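-- pv_equiv track=rewrite | github.com/ivantohelpyou/spawn-experiments | experiments/1.501.1-email-validator-severed-branch/1-immediate-implementation/email_validator.py | _validate_domain_label
-- ===== SOURCE A (Python) =====
-- def _validate_domain_label(label: str, is_tld: bool = False) -> bool:
--     """Validate a single domain label."""
--
--     # Must not be empty and length 1-63 characters
--     if not label or len(label) > 63:
--         return False
--
--     # Must not start or end with hyphen
--     if label.startswith('-') or label.endswith('-'):
--         return False
--
--     if is_tld:
--         # TLD must be at least 2 characters and letters only
--         if len(label) < 2:
--             return False
--         if not label.isalpha():
--             return False
--     else: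
--         # Regular domain labels: a-z, A-Z, 0-9, hyphens in middle only
--         allowed_chars = set('abcdefghijklmnopqrstuvwxyzABCDEFGHIJKLMNOPQRSTUVWXYZ0123456789-')
--         for char in label:
--             if char not in allowed_chars:
--                 return False
--
--     return True
-- ===== SOURCE B (Python) =====
-- def _validate_domain_label(label: str, is_tld: bool = False) -> bool:
--     """Validate a single domain label via a one-pass DFA (start/after-alnum/after-hyphen)."""
--     if is_tld:
--         # isalpha() already rules out hyphens and the empty string
--         return 2 <= len(label) <= 63 and label.isalpha()
--     state = 0  # 0 = start, 1 = after alphanumeric, 2 = after hyphen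
--     count = 0
--     for ch in label:
--         count += 1
--         if count > 63:
--             return False
--         if 'a' <= ch <= 'z' or 'A' <= ch <= 'Z' or '0' <= ch <= '9':
--             state = 1
--         elif ch == '-' and state != 0:
--             state = 2
--         else:
--             return False
--     return state == 1
-- ===== Notes on version B (the rewrite author's own statement) =====
-- stated objective: alternative
-- what changed: A's staged guard chain (empty/length, startswith/endswith hyphen, then a per-character set-membership loop) is replaced for non-TLD labels by a single-pass DFA with three states (start, after-alphanumeric, after-hyphen) and a running length counter, so emptiness, edge hyphens, the character class and the length bound all fall out of one scan; the TLD branch collapses to a closed length-range + isalpha test.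
import Mathlib
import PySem

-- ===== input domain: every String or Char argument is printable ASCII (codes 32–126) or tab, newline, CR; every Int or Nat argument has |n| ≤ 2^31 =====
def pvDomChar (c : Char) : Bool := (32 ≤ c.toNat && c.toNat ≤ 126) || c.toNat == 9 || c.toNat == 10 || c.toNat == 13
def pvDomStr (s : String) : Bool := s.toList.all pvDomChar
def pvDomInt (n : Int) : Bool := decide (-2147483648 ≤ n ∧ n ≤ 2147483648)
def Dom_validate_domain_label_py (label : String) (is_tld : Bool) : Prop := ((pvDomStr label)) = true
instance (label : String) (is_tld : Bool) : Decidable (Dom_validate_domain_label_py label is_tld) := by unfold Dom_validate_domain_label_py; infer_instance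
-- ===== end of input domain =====

-- B replaces A's staged guards + per-character membership loop by a one-pass three-state DFA
-- (start / after-alphanumeric / after-hyphen) with a running length counter; TLD branch is one formula.

-- the character set literal Python A spells out: set('abc…-')
def pvAllowedChars : PySem.Set Char :=
  PySem.Set.ofList "abcdefghijklmnopqrstuvwxyzABCDEFGHIJKLMNOPQRSTUVWXYZ0123456789-".toList

-- ===== PORT A =====
-- A's `for char in label: if char not in allowed_chars: return False`
def pvALoop : List Char → Bool
  | [] => true
  | c :: rest => if PySem.Set.contains pvAllowedChars c then pvALoop rest else false

def validate_domain_label_py (label : String) (is_tld : Bool) : Bool :=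
  -- if not label or len(label) > 63: return False
  if label.toList.isEmpty || PySem.Str.len label > 63 then false
  -- if label.startswith('-') or label.endswith('-'): return False
  else if PySem.Str.startswith label "-" || PySem.Str.endswith label "-" then false
  else if is_tld then
    if PySem.Str.len label < 2 then false
    else if !PySem.Str.strIsalpha label then false
    else true
  else
    pvALoop label.toList

-- ===== PORT B =====
-- Source B's `'a' <= ch <= 'z' or 'A' <= ch <= 'Z' or '0' <= ch <= '9'`
def pvIsAln (ch : Char) : Bool :=
  (decide ('a' ≤ ch) && decide (ch ≤ 'z')) || (decide ('A' ≤ ch) && decide (ch ≤ 'Z')) ||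
    (decide ('0' ≤ ch) && decide (ch ≤ '9'))

-- Source B's DFA loop: arguments are (remaining chars, state, count)
def pvBDFA : List Char → Int → Int → Bool
  | [], state, _ => state == 1
  | ch :: rest, state, count =>
      let count := count + 1
      if count > 63 then false
      else if pvIsAln ch then pvBDFA rest 1 count
      else if ch == '-' && !(state == 0) then pvBDFA rest 2 count
      else false

def validate_domain_label_py_alt (label : String) (is_tld : Bool) : Bool :=
  if is_tld then
    -- 2 <= len(label) <= 63 and label.isalpha()
    decide (2 ≤ PySem.Str.len label) && decide (PySem.Str.len label ≤ 63) && PySem.Str.strIsalpha label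
  else
    pvBDFA label.toList 0 0

-- ===== PRECONDITION & SPEC =====
def Spec_validate_domain_label_py (label : String) (is_tld : Bool) (out : Bool) : Prop := out = validate_domain_label_py_alt label is_tld
instance (label : String) (is_tld : Bool) (out : Bool) : Decidable (Spec_validate_domain_label_py label is_tld out) := by unfold Spec_validate_domain_label_py; infer_instance

-- ===== CLAIM (what is proved, stated in full; the proofs are below) =====
def Claim_equal_validate_domain_label_py : Prop := ∀ (label : String) (is_tld : Bool), Dom_validate_domain_label_py label is_tld → Spec_validate_domain_label_py label is_tld (validate_domain_label_py label is_tld)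

-- ===== LEMMAS AND PROOFS =====

-- A's early-return loop is the all-elements test on the same set
theorem pvALoop_eq_all (cs : List Char) :
    pvALoop cs = cs.all (pvAllowedChars.contains ·) := by
  induction cs with
  | nil => rfl
  | cons c rest ih =>
    simp only [pvALoop, List.all_cons]
    by_cases h : PySem.Set.contains pvAllowedChars c = true <;> simp [ih]

-- membership in the spelled-out character set is the range test of B
theorem contains_allowed (ch : Char) :
    pvAllowedChars.contains ch = (pvIsAln ch || ch == '-') := by
  rw [Bool.eq_iff_iff, PySem.Set.contains_iff]
  have hmem : ch ∈ pvAllowedChars ↔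
      ch ∈ "abcdefghijklmnopqrstuvwxyzABCDEFGHIJKLMNOPQRSTUVWXYZ0123456789-".toList :=
    PySem.Set.mem_ofList _ ch
  rw [hmem]
  simp only [pvIsAln, Bool.or_eq_true, Bool.and_eq_true, decide_eq_true_eq, beq_iff_eq,
    show "abcdefghijklmnopqrstuvwxyzABCDEFGHIJKLMNOPQRSTUVWXYZ0123456789-".toList =
      ['a','b','c','d','e','f','g','h','i','j','k','l','m','n','o','p','q','r','s','t','u','v','w',
       'x','y','z','A','B','C','D','E','F','G','H','I','J','K','L','M','N','O','P','Q','R','S','T',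
       'U','V','W','X','Y','Z','0','1','2','3','4','5','6','7','8','9','-'] from rfl,
    List.mem_cons, List.not_mem_nil, or_false, Char.ext_iff, Char.le_def,
    UInt32.le_iff_toNat_le, ← UInt32.toNat_inj,
    show ('a').val.toNat = 97 from rfl,
    show ('b').val.toNat = 98 from rfl,
    show ('c').val.toNat = 99 from rfl,
    show ('d').val.toNat = 100 from rfl,
    show ('e').val.toNat = 101 from rfl,
    show ('f').val.toNat = 102 from rfl,
    show ('g').val.toNat = 103 from rfl,
    show ('h').val.toNat = 104 from rfl,
    show ('i').val.toNat = 105 from rfl,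
    show ('j').val.toNat = 106 from rfl,
    show ('k').val.toNat = 107 from rfl,
    show ('l').val.toNat = 108 from rfl,
    show ('m').val.toNat = 109 from rfl,
    show ('n').val.toNat = 110 from rfl,
    show ('o').val.toNat = 111 from rfl,
    show ('p').val.toNat = 112 from rfl,
    show ('q').val.toNat = 113 from rfl,
    show ('r').val.toNat = 114 from rfl,
    show ('s').val.toNat = 115 from rfl,
    show ('t').val.toNat = 116 from rfl,
    show ('u').val.toNat = 117 from rfl,
    show ('v').val.toNat = 118 from rfl,
    show ('w').val.toNat = 119 from rfl,
    show ('x').val.toNat = 120 from rfl,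
    show ('y').val.toNat = 121 from rfl,
    show ('z').val.toNat = 122 from rfl,
    show ('A').val.toNat = 65 from rfl,
    show ('B').val.toNat = 66 from rfl,
    show ('C').val.toNat = 67 from rfl,
    show ('D').val.toNat = 68 from rfl,
    show ('E').val.toNat = 69 from rfl,
    show ('F').val.toNat = 70 from rfl,
    show ('G').val.toNat = 71 from rfl,
    show ('H').val.toNat = 72 from rfl,
    show ('I').val.toNat = 73 from rfl,
    show ('J').val.toNat = 74 from rfl,
    show ('K').val.toNat = 75 from rfl,
    show ('L').val.toNat = 76 from rfl,
    show ('M').val.toNat = 77 from rfl,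
    show ('N').val.toNat = 78 from rfl,
    show ('O').val.toNat = 79 from rfl,
    show ('P').val.toNat = 80 from rfl,
    show ('Q').val.toNat = 81 from rfl,
    show ('R').val.toNat = 82 from rfl,
    show ('S').val.toNat = 83 from rfl,
    show ('T').val.toNat = 84 from rfl,
    show ('U').val.toNat = 85 from rfl,
    show ('V').val.toNat = 86 from rfl,
    show ('W').val.toNat = 87 from rfl,
    show ('X').val.toNat = 88 from rfl,
    show ('Y').val.toNat = 89 from rfl,
    show ('Z').val.toNat = 90 from rfl,
    show ('0').val.toNat = 48 from rfl,
    show ('1').val.toNat = 49 from rfl,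
    show ('2').val.toNat = 50 from rfl,
    show ('3').val.toNat = 51 from rfl,
    show ('4').val.toNat = 52 from rfl,
    show ('5').val.toNat = 53 from rfl,
    show ('6').val.toNat = 54 from rfl,
    show ('7').val.toNat = 55 from rfl,
    show ('8').val.toNat = 56 from rfl,
    show ('9').val.toNat = 57 from rfl,
    show ('-').val.toNat = 45 from rfl]
  omega

-- `label.startswith('-')` / `label.endswith('-')` read the first / last character
theorem startswith_hyphen (cs : List Char) :
    PySem.Chars.startswith cs ['-'] = (cs.head? == some '-') := by
  cases cs with
  | nil => rfl
  | cons c r => simp [PySem.Chars.startswith, List.isPrefixOf, BEq.comm]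

theorem singleton_suffix_iff (cs : List Char) (x : Char) :
    [x] <:+ cs ↔ cs.getLast? = some x := by
  rw [← List.reverse_prefix]
  show [x] <+: cs.reverse ↔ _
  rw [← List.head?_reverse]
  cases cs.reverse with
  | nil => simp
  | cons c r => simp [List.cons_prefix_cons, eq_comm]

theorem endswith_hyphen (cs : List Char) :
    PySem.Chars.endswith cs ['-'] = (cs.getLast? == some '-') := by
  rw [Bool.eq_iff_iff, PySem.Chars.endswith_iff, singleton_suffix_iff]
  simp

-- an all-letters label cannot start or end with a hyphen
theorem alpha_head (cs : List Char) (h : PySem.Chars.strIsalpha cs = true) :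
    cs.head? ≠ some '-' := by
  intro hh
  have hm : '-' ∈ cs := by
    cases cs with
    | nil => simp at hh
    | cons c r => simp at hh; simp [hh]
  simp only [PySem.Chars.strIsalpha, Bool.and_eq_true, List.all_eq_true] at h
  have := h.2 '-' hm
  simp [PySem.Chars.isalpha, PySem.Chars.isupper, PySem.Chars.islower] at this

theorem alpha_last (cs : List Char) (h : PySem.Chars.strIsalpha cs = true) :
    cs.getLast? ≠ some '-' := by
  intro hh
  have hm : '-' ∈ cs := List.mem_of_getLast? hh
  simp only [PySem.Chars.strIsalpha, Bool.and_eq_true, List.all_eq_true] at h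
  have := h.2 '-' hm
  simp [PySem.Chars.isalpha, PySem.Chars.isupper, PySem.Chars.islower] at this

-- the DFA from a non-start state accepts iff: length fits, every char allowed, last char alphanumeric
theorem pvBDFA_run (cs : List Char) : ∀ (s c : Int), c ≤ 63 → (s = 1 ∨ s = 2) →
    pvBDFA cs s c =
      (decide ((c + cs.length : Int) ≤ 63) && cs.all (pvAllowedChars.contains ·) &&
        (match cs.getLast? with | none => s == 1 | some x => pvIsAln x)) := by
  induction cs with
  | nil =>
    intro s c hc hs
    simp [pvBDFA]
    omega
  | cons ch rest ih =>
    intro s c hc hs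
    simp only [pvBDFA]
    by_cases h63 : c + 1 > 63
    · have hfalse : decide ((c + ((ch :: rest).length : Int)) ≤ 63) = false := by
        simp only [List.length_cons, decide_eq_false_iff_not]
        push_cast; omega
      rw [if_pos h63, hfalse]
      simp
    · push_neg at h63
      have hs1 : ((1:Int) = 1 ∨ (1:Int) = 2) := Or.inl rfl
      have hs2 : ((2:Int) = 1 ∨ (2:Int) = 2) := Or.inr rfl
      have hlen : ((c + (ch :: rest).length : Int) ≤ 63) ↔ ((c + 1 + rest.length : Int) ≤ 63) := by
        simp only [List.length_cons]; push_cast; constructor <;> intro <;> omega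
      by_cases ha : pvIsAln ch = true
      · rw [if_neg (by omega), if_pos ha, ih 1 (c+1) h63 hs1]
        have hcont : pvAllowedChars.contains ch = true := by rw [contains_allowed, ha]; simp
        cases hr : rest.getLast? with
        | none =>
          have : rest = [] := by cases rest with | nil => rfl | cons a b => simp [List.getLast?_cons] at hr
          subst this
          have hdec : decide ((c + (([ch] : List Char).length : Int)) ≤ 63) = decide ((c + 1 + (([] : List Char).length : Int)) ≤ 63) := by
            rw [decide_eq_decide]; push_cast; omega
          have hmem : ch ∈ pvAllowedChars := (PySem.Set.contains_iff _ _).mp hcont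
          simp [hdec, hcont, ha, hmem]
        | some x =>
          have hl2 : (ch :: rest).getLast? = some x := by
            cases rest with | nil => simp at hr | cons a b => simpa [List.getLast?_cons] using hr
          have hdec : decide ((c + (((ch :: rest) : List Char).length : Int)) ≤ 63) = decide ((c + 1 + ((rest : List Char).length : Int)) ≤ 63) := by
            rw [decide_eq_decide]; push_cast; omega
          simp only [hl2, hr, List.all_cons, hcont, Bool.true_and, hdec]
      · by_cases hh : (ch == '-' && !(s == 0)) = true
        · rw [if_neg (by omega), if_neg (by simp [ha]), if_pos hh, ih 2 (c+1) h63 hs2]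
          have hch : ch = '-' := by
            have h' := hh
            simp only [Bool.and_eq_true, beq_iff_eq] at h'
            exact h'.1
          have hcont : pvAllowedChars.contains ch = true := by rw [contains_allowed, hch]; simp
          cases hr : rest.getLast? with
          | none =>
            have : rest = [] := by cases rest with | nil => rfl | cons a b => simp [List.getLast?_cons] at hr
            subst this
            have hna : pvIsAln ch = false := by simpa using ha
            simp [hcont, hna]
          | some x =>
            have hl2 : (ch :: rest).getLast? = some x := by
              cases rest with | nil => simp at hr | cons a b => simpa [List.getLast?_cons] using hr
            have hdec : decide ((c + (((ch :: rest) : List Char).length : Int)) ≤ 63) = decide ((c + 1 + ((rest : List Char).length : Int)) ≤ 63) := by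
              rw [decide_eq_decide]; push_cast; omega
            simp only [hl2, hr, List.all_cons, hcont, Bool.true_and, hdec]
        · rw [if_neg (by omega), if_neg (by simp [ha]), if_neg hh]
          have hch : ch ≠ '-' := by
            intro h; subst h
            rcases hs with h | h <;> subst h <;> simp at hh
          have hcont : pvAllowedChars.contains ch = false := by
            rw [contains_allowed]
            simp [ha, hch]
          have hnot : ch ∉ pvAllowedChars := by simpa using hcont
          simp [hcont, hnot]

-- an alphanumeric character is not a hyphen
theorem pvIsAln_ne_hyphen (x : Char) (h : pvIsAln x = true) : x ≠ '-' := by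
  intro e; subst e; exact absurd h (by decide)

-- the whole equivalence, stated over the character list
theorem pvMain (cs : List Char) (is_tld : Bool) :
    (if (cs.isEmpty || decide ((cs.length : Int) > 63)) = true then false
      else
        if (PySem.Chars.startswith cs ['-'] || PySem.Chars.endswith cs ['-']) = true then false
        else
          if is_tld = true then
            if (cs.length : Int) < 2 then false
            else if (!PySem.Chars.strIsalpha cs) = true then false else true
          else pvALoop cs) =
      (if is_tld = true then
        decide (2 ≤ (cs.length : Int)) && decide ((cs.length : Int) ≤ 63) && PySem.Chars.strIsalpha cs
      else pvBDFA cs 0 0) := by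
  cases is_tld with
  | true =>
    rw [startswith_hyphen, endswith_hyphen]
    by_cases ha : PySem.Chars.strIsalpha cs = true
    · have h0 : cs.isEmpty = false := by
        simp only [PySem.Chars.strIsalpha, Bool.and_eq_true] at ha
        simpa using ha.1
      have h1 := alpha_head cs ha
      have h2 := alpha_last cs ha
      simp only [h0, ha, Bool.false_or, Bool.not_true, if_true]
      by_cases h63 : ((cs.length : Int) > 63) <;>
        by_cases hsm : ((cs.length : Int) < 2) <;>
          simp [h63, hsm, h1, h2] <;> omega
    · simp only [Bool.not_eq_true] at ha
      simp only [ha]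
      split_ifs <;> simp_all
  | false =>
    cases cs with
    | nil => simp [pvBDFA]
    | cons ch rest =>
      rw [startswith_hyphen, endswith_hyphen, Bool.eq_iff_iff]
      simp only [Bool.false_eq_true, if_false]
      have hB : pvBDFA (ch :: rest) 0 0 = true ↔
          ((((ch :: rest).length : Int)) ≤ 63 ∧ pvIsAln ch = true ∧
            (∀ x ∈ rest, pvAllowedChars.contains x = true) ∧
            (∃ y, (ch :: rest).getLast? = some y ∧ pvIsAln y = true)) := by
        simp only [pvBDFA]
        rw [if_neg (show ¬((0:Int) + 1 > 63) by omega)]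
        by_cases ha : pvIsAln ch = true
        · rw [if_pos ha, pvBDFA_run rest 1 (0+1) (by omega) (Or.inl rfl)]
          cases hr : rest.getLast? with
          | none =>
            have hrest : rest = [] := by
              cases rest with | nil => rfl | cons a b => simp [List.getLast?_cons] at hr
            subst hrest
            norm_num [ha]
          | some x =>
            have hlast : (ch :: rest).getLast? = some x := by
              cases rest with | nil => simp at hr | cons a b => simpa [List.getLast?_cons] using hr
            simp only [hr, Bool.and_eq_true, List.all_eq_true, decide_eq_true_eq,
              List.length_cons]
            constructor
            · rintro ⟨⟨h1, h2⟩, h3⟩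
              refine ⟨by push_cast; push_cast at h1; omega, ha, ?_, x, hlast, h3⟩
              intro x hx
              have := h2 x hx
              simpa using this
            · rintro ⟨h1, -, h2, y, hy, h3⟩
              have hyx : y = x := by rw [hlast] at hy; exact (Option.some_inj.mp hy).symm
              subst hyx
              refine ⟨⟨by push_cast at h1 ⊢; omega, ?_⟩, h3⟩
              intro x hx
              have := h2 x hx
              simpa using this
        · rw [if_neg ha, if_neg (by simp)]
          simp [ha]
      rw [hB]
      constructor
      · intro h
        by_cases hg1 : ((ch :: rest).isEmpty || decide ((((ch :: rest).length : Int)) > 63)) = true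
        · rw [if_pos hg1] at h; exact absurd h (by simp)
        by_cases hg2 : (((ch :: rest).head? == some '-') || ((ch :: rest).getLast? == some '-')) = true
        · rw [if_neg hg1, if_pos hg2] at h; exact absurd h (by simp)
        rw [if_neg hg1, if_neg hg2] at h
        rw [pvALoop_eq_all] at h
        simp only [List.all_eq_true] at h
        simp only [List.isEmpty_cons, Bool.false_or, Bool.or_eq_true, not_or, beq_iff_eq,
          decide_eq_true_eq, not_lt, List.head?_cons] at hg1 hg2
        have hch : ch ≠ '-' := by
          intro e; exact hg2.1 (by simp [e])
        refine ⟨by simp only [List.length_cons] at hg1 ⊢; push_cast at hg1 ⊢; omega, ?_, fun x hx => h x (List.mem_cons_of_mem _ hx), ?_⟩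
        · have hc := h ch (List.mem_cons_self ..)
          rw [contains_allowed] at hc
          simpa [hch] using hc
        · obtain ⟨y, hy⟩ : ∃ y, (ch :: rest).getLast? = some y := by
            cases h' : (ch :: rest).getLast? with
            | none => simp at h'
            | some y => exact ⟨y, rfl⟩
          have hcy := h y (List.mem_of_getLast? hy)
          rw [contains_allowed] at hcy
          have hyne : y ≠ '-' := fun e => hg2.2 (by rw [hy, e])
          exact ⟨y, hy, by simpa [hyne] using hcy⟩
      · rintro ⟨h1, h2, h3, y, hy, h4⟩
        have hch : ch ≠ '-' := pvIsAln_ne_hyphen ch h2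
        have hyne : y ≠ '-' := pvIsAln_ne_hyphen y h4
        have hg1 : ((ch :: rest).isEmpty || decide ((((ch :: rest).length : Int)) > 63)) = false := by
          simp only [List.isEmpty_cons, Bool.false_or, decide_eq_false_iff_not, not_lt,
            List.length_cons]
          simp only [List.length_cons] at h1
          push_cast; push_cast at h1; omega
        have hg2 : (((ch :: rest).head? == some '-') || ((ch :: rest).getLast? == some '-')) = false := by
          simp [List.head?_cons, hy, hch, hyne]
        simp only [hg1, hg2, Bool.false_eq_true, if_false]
        rw [pvALoop_eq_all]
        simp only [List.all_eq_true]
        intro x hx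
        rcases List.mem_cons.mp hx with rfl | hx'
        · rw [contains_allowed]; simp [h2]
        · exact h3 x hx' 


-- ===== VERDICT (by name: the statement is the Claim_ definition above) =====
theorem validate_domain_label_py_spec : Claim_equal_validate_domain_label_py := by
  intro label is_tld hdom
  unfold Spec_validate_domain_label_py validate_domain_label_py validate_domain_label_py_alt
  have hdash : ("-" : String).toList = ['-'] := rfl
  simp only [PySem.Str.len_eq, PySem.Str.startswith_eq, PySem.Str.endswith_eq,
    PySem.Str.strIsalpha_eq, hdash]
  exact pvMain label.toList is_tld
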